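-- pv_equiv track=rewrite | github.com/Masonb3/LRLG_notebooks | LRLG_sym_wc_functions.py | get_high_SW
-- ===== SOURCE A (Python) =====
-- def get_high_SW(wc_pos, n):
--     wc_SW = [-1,2*n]
--     ind = 0
--     for i in range(0,n):
--         curr_row = wc_pos[i][0]
--         curr_col = wc_pos[i][1]
--         if (curr_row >= n) and (curr_col < n) and (curr_row < wc_SW[1]):
--             wc_SW = wc_pos[i]
--             ind = i
--     return wc_SW, ind
-- ===== SOURCE B (Python) =====
-- def get_high_SW(wc_pos, n):
--     # First row with n <= row < 2*n and col < n wins: once A accepts a row,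
--     # its threshold wc_SW[1] drops below n, so no later candidate can pass.
--     for i in range(n):
--         row = wc_pos[i][0]
--         col = wc_pos[i][1]
--         if n <= row < 2 * n and col < n:
--             return wc_pos[i], i
--     return [-1, 2 * n], 0
-- ===== Notes on version B (the rewrite author's own statement) =====
-- stated objective: simpler
-- what changed: Replaces the fold with a self-referential mutable threshold wc_SW[1] by an early-return scan for the first row with n <= row < 2n and col < n (proved equivalent: after an acceptance the threshold is < n, so the guard can never fire again).
import Mathlib
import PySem

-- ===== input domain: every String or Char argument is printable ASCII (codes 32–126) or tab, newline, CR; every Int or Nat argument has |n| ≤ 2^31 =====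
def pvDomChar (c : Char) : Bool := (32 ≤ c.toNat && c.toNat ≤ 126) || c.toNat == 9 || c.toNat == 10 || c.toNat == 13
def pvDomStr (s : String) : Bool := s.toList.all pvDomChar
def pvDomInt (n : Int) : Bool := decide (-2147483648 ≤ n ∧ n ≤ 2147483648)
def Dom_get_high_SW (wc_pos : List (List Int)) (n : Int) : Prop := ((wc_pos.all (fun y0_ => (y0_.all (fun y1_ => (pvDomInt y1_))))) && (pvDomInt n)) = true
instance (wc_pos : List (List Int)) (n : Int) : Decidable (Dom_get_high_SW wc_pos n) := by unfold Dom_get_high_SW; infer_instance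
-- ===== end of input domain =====

-- B replaces A's fold with a mutable threshold by an early-return scan for the
-- first qualifying row (simpler): after an acceptance the threshold is < n, so
-- A's guard can never fire again.


-- ===== PORT A =====
def get_high_SW (wc_pos : List (List Int)) (n : Int) : List Int × Int :=
  (PySem.List.pyRange 0 n 1).foldl
    (fun (st : List Int × Int) i =>
      let curr_row := PySem.List.pyGetD (PySem.List.pyGetD wc_pos i []) 0 0
      let curr_col := PySem.List.pyGetD (PySem.List.pyGetD wc_pos i []) 1 0
      if curr_row ≥ n ∧ curr_col < n ∧ curr_row < PySem.List.pyGetD st.1 1 0 then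
        (PySem.List.pyGetD wc_pos i [], i)
      else st)
    ([-1, 2 * n], 0)

-- ===== PORT B =====
def ghswScan (wc_pos : List (List Int)) (n : Int) : List Int → List Int × Int
  | [] => ([-1, 2 * n], 0)
  | i :: rest =>
    let r := PySem.List.pyGetD wc_pos i []
    let row := PySem.List.pyGetD r 0 0
    let col := PySem.List.pyGetD r 1 0
    if n ≤ row ∧ row < 2 * n ∧ col < n then (r, i) else ghswScan wc_pos n rest

def get_high_SW_alt (wc_pos : List (List Int)) (n : Int) : List Int × Int :=
  ghswScan wc_pos n (PySem.List.pyRange 0 n 1)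

-- ===== PRECONDITION & SPEC =====
-- A indexes wc_pos[i][0] and wc_pos[i][1] for every i < n; outside this Pre_ it raises IndexError.
def Pre_get_high_SW (wc_pos : List (List Int)) (n : Int) : Prop :=
  n ≤ wc_pos.length ∧ ∀ r ∈ wc_pos.take n.toNat, 2 ≤ r.length
instance (wc_pos : List (List Int)) (n : Int) : Decidable (Pre_get_high_SW wc_pos n) := by
  unfold Pre_get_high_SW; infer_instance
def pvWitness_get_high_SW : List (List Int) × Int := ([[5, 1], [6, 0], [2, 2]], 2)

def Spec_get_high_SW (wc_pos : List (List Int)) (n : Int) (out : List Int × Int) : Prop := out = get_high_SW_alt wc_pos n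
instance (wc_pos : List (List Int)) (n : Int) (out : List Int × Int) : Decidable (Spec_get_high_SW wc_pos n out) := by unfold Spec_get_high_SW; infer_instance

-- ===== CLAIM (what is proved, stated in full; the proofs are below) =====
def Claim_equal_get_high_SW : Prop := ∀ (wc_pos : List (List Int)) (n : Int), Dom_get_high_SW wc_pos n → Pre_get_high_SW wc_pos n → Spec_get_high_SW wc_pos n (get_high_SW wc_pos n)

-- ===== LEMMAS AND PROOFS =====

-- Once the accumulated wc_SW has second entry < n, A's guard can never fire.
theorem ghsw_sticky (wc_pos : List (List Int)) (n : Int) (L : List Int)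
    (st : List Int × Int) (h : PySem.List.pyGetD st.1 1 0 < n) :
    L.foldl
      (fun (st : List Int × Int) i =>
        let curr_row := PySem.List.pyGetD (PySem.List.pyGetD wc_pos i []) 0 0
        let curr_col := PySem.List.pyGetD (PySem.List.pyGetD wc_pos i []) 1 0
        if curr_row ≥ n ∧ curr_col < n ∧ curr_row < PySem.List.pyGetD st.1 1 0 then
          (PySem.List.pyGetD wc_pos i [], i)
        else st)
      st = st := by
  induction L generalizing st with
  | nil => rfl
  | cons i rest ih =>
    simp only [List.foldl_cons]
    rw [if_neg (by intro ⟨h1, _, h3⟩; omega)]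
    exact ih st h

theorem ghsw_fold_eq_scan (wc_pos : List (List Int)) (n : Int) (L : List Int) :
    L.foldl
      (fun (st : List Int × Int) i =>
        let curr_row := PySem.List.pyGetD (PySem.List.pyGetD wc_pos i []) 0 0
        let curr_col := PySem.List.pyGetD (PySem.List.pyGetD wc_pos i []) 1 0
        if curr_row ≥ n ∧ curr_col < n ∧ curr_row < PySem.List.pyGetD st.1 1 0 then
          (PySem.List.pyGetD wc_pos i [], i)
        else st)
      ([-1, 2 * n], 0) = ghswScan wc_pos n L := by
  induction L with
  | nil => rfl
  | cons i rest ih =>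
    simp only [List.foldl_cons, ghswScan]
    have hinit : PySem.List.pyGetD (([-1, 2 * n], (0 : Int)).1) 1 0 = 2 * n := by
      simp [PySem.List.pyGetD, PySem.List.pyGet?, PySem.List.pyIdx?]
    by_cases hc : n ≤ PySem.List.pyGetD (PySem.List.pyGetD wc_pos i []) 0 0 ∧
        PySem.List.pyGetD (PySem.List.pyGetD wc_pos i []) 0 0 < 2 * n ∧
        PySem.List.pyGetD (PySem.List.pyGetD wc_pos i []) 1 0 < n
    · rw [if_pos (by rw [hinit]; exact ⟨hc.1, hc.2.2, hc.2.1⟩), if_pos hc]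
      exact ghsw_sticky wc_pos n rest _ hc.2.2
    · rw [if_neg (by rw [hinit]; intro ⟨h1, h2, h3⟩; exact hc ⟨h1, h3, h2⟩), if_neg hc]
      exact ih

-- ===== VERDICT (by name: the statement is the Claim_ definition above) =====
theorem get_high_SW_spec : Claim_equal_get_high_SW := by
  intro wc_pos n _ _
  unfold Spec_get_high_SW get_high_SW get_high_SW_alt
  exact ghsw_fold_eq_scan wc_pos n _
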